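-- pv_equiv track=rewrite | github.com/raghav-sriram/AI-ML-Exploration | Tetris Genetic Algorithm/mysuphciphcopy.py | fill_child
-- ===== SOURCE A (Python) =====
-- def fill_child(child, parent2):
--     child_set = set(child)
--
--     for i, letter in enumerate(parent2):
--         if letter not in child_set:
--             child_set.add(letter)
--
--             for j in range(len(child)):
--                 if child[j] == "":
--                     child[j] = letter
--                     break
--
--     return child
-- ===== SOURCE B (Python) =====
-- def fill_child(child, parent2):
--     seen = set(child)
--     empties = iter([j for j, c in enumerate(child) if c == ""])
--     for letter in parent2:
--         if letter not in seen:
--             j = next(empties, None)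
--             if j is None:
--                 break
--             seen.add(letter)
--             child[j] = letter
--     return child
-- ===== Notes on version B (the rewrite author's own statement) =====
-- stated objective: faster
-- what changed: B precomputes the list of empty-slot indices once and consumes it with an iterator, so each placed letter costs O(1) instead of A's inner rescan of child from index 0; B also stops once all slots are filled.
import Mathlib
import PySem

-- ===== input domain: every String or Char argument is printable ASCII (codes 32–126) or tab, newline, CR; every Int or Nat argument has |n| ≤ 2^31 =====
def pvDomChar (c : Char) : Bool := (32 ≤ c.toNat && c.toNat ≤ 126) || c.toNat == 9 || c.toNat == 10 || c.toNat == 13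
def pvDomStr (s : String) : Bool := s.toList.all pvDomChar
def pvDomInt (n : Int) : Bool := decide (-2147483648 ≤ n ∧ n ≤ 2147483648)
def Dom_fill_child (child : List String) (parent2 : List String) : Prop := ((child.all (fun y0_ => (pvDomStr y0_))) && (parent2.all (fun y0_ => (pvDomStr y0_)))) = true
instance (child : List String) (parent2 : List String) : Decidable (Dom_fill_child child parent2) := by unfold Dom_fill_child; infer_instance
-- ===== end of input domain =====

-- B fills empty slots via a precomputed index list consumed incrementally (O(n+m)) instead of
-- A's rescan of child from index 0 for every placed letter; return values proved equal.
-- Both Pythons mutate `child` in place identically; the equivalence proved here is about the return value.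

-- ===== PORT A =====
-- inner loop: 'for j in range(len(child)): if child[j] == "": child[j] = letter; break'
def pvFillFirst : List String → String → List String
  | [], _ => []
  | c :: rest, letter => if c = "" then letter :: rest else c :: pvFillFirst rest letter

def fill_child (child : List String) (parent2 : List String) : List String :=
  (parent2.foldl
    (fun (st : List String × PySem.Set String) letter =>
      if PySem.Set.contains st.2 letter then st
      else (pvFillFirst st.1 letter, PySem.Set.add st.2 letter))
    (child, PySem.Set.ofList child)).1

-- ===== PORT B =====
-- '[j for j, c in enumerate(child) if c == ""]'
def pvEmptyIdx : List String → Nat → List Nat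
  | [], _ => []
  | c :: rest, i => if c = "" then i :: pvEmptyIdx rest (i + 1) else pvEmptyIdx rest (i + 1)

-- the for-loop over parent2 with 'break' when the empty-slot iterator is exhausted
def pvFillGo : List String → List String → PySem.Set String → List Nat → List String
  | [], ch, _, _ => ch
  | letter :: rest, ch, seen, empties =>
    if PySem.Set.contains seen letter then pvFillGo rest ch seen empties
    else
      match empties with
      | [] => ch
      | j :: es => pvFillGo rest (ch.set j letter) (PySem.Set.add seen letter) es

def fill_child_alt (child : List String) (parent2 : List String) : List String :=
  pvFillGo parent2 child (PySem.Set.ofList child) (pvEmptyIdx child 0)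

-- ===== PRECONDITION & SPEC =====
def Spec_fill_child (child : List String) (parent2 : List String) (out : List String) : Prop := out = fill_child_alt child parent2
instance (child : List String) (parent2 : List String) (out : List String) : Decidable (Spec_fill_child child parent2 out) := by unfold Spec_fill_child; infer_instance

-- ===== CLAIM (what is proved, stated in full; the proofs are below) =====
def Claim_equal_fill_child : Prop := ∀ (child : List String) (parent2 : List String), Dom_fill_child child parent2 → Spec_fill_child child parent2 (fill_child child parent2)

-- ===== LEMMAS AND PROOFS =====

-- offset shift for the empty-index list
theorem pvEmptyIdx_shift (ch : List String) (i : Nat) :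
    pvEmptyIdx ch i = (pvEmptyIdx ch 0).map (· + i) := by
  induction ch generalizing i with
  | nil => simp [pvEmptyIdx]
  | cons c rest ih =>
    by_cases h : c = ""
    · simp [pvEmptyIdx, h, ih (i + 1), ih 1, List.map_map]
      intro a _
      omega
    · simp [pvEmptyIdx, h, ih (i + 1), ih 1, List.map_map]
      intro a _
      omega

-- no empty slot ⇒ the inner scan is a no-op
theorem pvFillFirst_of_no_empty (ch : List String) (l : String)
    (h : pvEmptyIdx ch 0 = []) : pvFillFirst ch l = ch := by
  induction ch with
  | nil => rfl
  | cons c rest ih =>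
    by_cases hc : c = ""
    · simp [pvEmptyIdx, hc] at h
    · simp [pvEmptyIdx, hc, pvEmptyIdx_shift rest 1] at h
      simp [pvFillFirst, hc, ih h]

-- the inner scan places the letter at the first empty index, which is consumed
theorem pvFillFirst_eq_set (ch : List String) (l : String) (j : Nat) (es : List Nat)
    (hl : l ≠ "") (h : pvEmptyIdx ch 0 = j :: es) :
    pvFillFirst ch l = ch.set j l ∧ pvEmptyIdx (ch.set j l) 0 = es := by
  induction ch generalizing j es with
  | nil => simp [pvEmptyIdx] at h
  | cons c rest ih =>
    by_cases hc : c = ""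
    · subst hc
      simp [pvEmptyIdx, pvEmptyIdx_shift rest 1] at h
      obtain ⟨hj, hes⟩ := h
      subst hj
      constructor
      · simp [pvFillFirst]
      · simp [List.set, pvEmptyIdx, hl, pvEmptyIdx_shift rest 1, hes]
    · rw [show pvEmptyIdx (c :: rest) 0 = (pvEmptyIdx rest 0).map (· + 1) by
          simp [pvEmptyIdx, hc, pvEmptyIdx_shift rest 1]] at h
      cases hre : pvEmptyIdx rest 0 with
      | nil => simp [hre] at h
      | cons j' es' =>
        simp [hre] at h
        obtain ⟨hj, hes⟩ := h
        obtain ⟨h1, h2⟩ := ih j' es' hre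
        subst hj
        constructor
        · simp [pvFillFirst, hc, h1, List.set]
        · rw [show (c :: rest).set (j' + 1) l = c :: rest.set j' l by simp [List.set]]
          simp [pvEmptyIdx, hc, pvEmptyIdx_shift (rest.set j' l) 1, h2, hes]

-- an empty index exists only if "" is among the child's slots
theorem pvMem_of_emptyIdx (ch : List String) (h : pvEmptyIdx ch 0 ≠ []) : "" ∈ ch := by
  induction ch with
  | nil => simp [pvEmptyIdx] at h
  | cons c rest ih =>
    by_cases hc : c = ""
    · simp [hc]
    · simp [pvEmptyIdx, hc, pvEmptyIdx_shift rest 1] at h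
      simp [ih h]

-- once the child has no empty slot, A's fold never changes the child component
theorem pvFoldA_no_empty (p2 : List String) (ch : List String) (s : PySem.Set String)
    (h : pvEmptyIdx ch 0 = []) :
    (p2.foldl
      (fun (st : List String × PySem.Set String) letter =>
        if PySem.Set.contains st.2 letter then st
        else (pvFillFirst st.1 letter, PySem.Set.add st.2 letter))
      (ch, s)).1 = ch := by
  induction p2 generalizing s with
  | nil => rfl
  | cons l rest ih =>
    by_cases hc : PySem.Set.contains s l = true
    · simp only [List.foldl, hc, if_true]
      exact ih s
    · simp only [List.foldl, hc, if_false, Bool.false_eq_true]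
      rw [pvFillFirst_of_no_empty ch l h]
      exact ih (PySem.Set.add s l)

-- main invariant: A's fold and B's loop agree when empties = pvEmptyIdx ch 0 and
-- "" is in seen whenever an empty slot remains
theorem pvMain (p2 : List String) (ch : List String) (s : PySem.Set String)
    (hs : pvEmptyIdx ch 0 ≠ [] → "" ∈ s) :
    (p2.foldl
      (fun (st : List String × PySem.Set String) letter =>
        if PySem.Set.contains st.2 letter then st
        else (pvFillFirst st.1 letter, PySem.Set.add st.2 letter))
      (ch, s)).1 = pvFillGo p2 ch s (pvEmptyIdx ch 0) := by
  induction p2 generalizing ch s with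
  | nil => rfl
  | cons l rest ih =>
    by_cases hm : l ∈ s
    · have hc : PySem.Set.contains s l = true := (PySem.Set.contains_iff s l).mpr hm
      simp only [List.foldl, pvFillGo, hc, if_true]
      exact ih ch s hs
    · have hc : ¬ PySem.Set.contains s l = true :=
        fun h => hm ((PySem.Set.contains_iff s l).mp h)
      simp only [List.foldl, pvFillGo, hc, if_false, Bool.false_eq_true]
      cases he : pvEmptyIdx ch 0 with
      | nil =>
        rw [pvFillFirst_of_no_empty ch l he]
        exact pvFoldA_no_empty rest ch (PySem.Set.add s l) he
      | cons j es =>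
        have hl : l ≠ "" := by
          intro hl; subst hl
          exact hm (hs (by simp [he]))
        obtain ⟨h1, h2⟩ := pvFillFirst_eq_set ch l j es hl he
        rw [h1, ← h2]
        apply ih
        intro _
        exact (PySem.Set.mem_add s l "").mpr (Or.inl (hs (by simp [he])))

-- ===== VERDICT (by name: the statement is the Claim_ definition above) =====
theorem fill_child_spec : Claim_equal_fill_child := by
  intro child parent2 _
  unfold Spec_fill_child fill_child fill_child_alt
  apply pvMain
  intro hne
  exact (PySem.Set.mem_ofList child "").mpr (pvMem_of_emptyIdx child hne)
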